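-- pv_equiv track=rewrite | github.com/emmaeng700/leetcodemr | generate_dsa_pdf.py | preprocess_backticks
-- ===== SOURCE A (Python) =====
-- def preprocess_backticks(content: str):
--     """Replace backtick template literals with [CODEn] placeholders."""
--     codes = []
--     result = []
--     i = 0
--     n = len(content)
--     while i < n:
--         if content[i] == "`":
--             j = i + 1
--             while j < n and content[j] != "`":
--                 j += 1
--             codes.append(content[i + 1 : j])
--             result.append(f"[CODE{len(codes) - 1}]")
--             i = j + 1
--         else:
--             result.append(content[i])
--             i += 1
--     return "".join(result), codes
-- ===== SOURCE B (Python) =====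
-- def preprocess_backticks(content: str):
--     """Replace backtick template literals with [CODEn] placeholders."""
--     parts = content.split('`')
--     codes = []
--     result = []
--     for idx, part in enumerate(parts):
--         if idx % 2 == 0:
--             result.append(part)
--         else:
--             codes.append(part)
--             result.append(f"[CODE{len(codes) - 1}]")
--     return "".join(result), codes
-- ===== Notes on version B (the rewrite author's own statement) =====
-- stated objective: simpler
-- what changed: Replaces the explicit two-level character scan (outer index loop plus inner closing-delimiter search) with a single split on the backtick character followed by one parity-dispatched pass over the parts: even parts copied verbatim, odd parts collected as codes.
import Mathlib
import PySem

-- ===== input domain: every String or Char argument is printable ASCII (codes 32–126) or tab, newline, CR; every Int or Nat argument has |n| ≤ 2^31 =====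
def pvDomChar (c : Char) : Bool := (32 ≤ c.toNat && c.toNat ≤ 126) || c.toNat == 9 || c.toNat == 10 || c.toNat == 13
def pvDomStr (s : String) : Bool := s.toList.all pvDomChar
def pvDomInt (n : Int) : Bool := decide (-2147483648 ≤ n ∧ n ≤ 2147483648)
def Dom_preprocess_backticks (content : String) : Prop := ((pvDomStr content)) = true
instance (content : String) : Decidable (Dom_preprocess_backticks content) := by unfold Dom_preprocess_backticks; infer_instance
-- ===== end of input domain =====

-- B replaces A's explicit two-level character scan by split('`') plus one parity-dispatched
-- pass over the parts (objective: simpler); return values proved equal on all inputs.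

-- ===== PORT A =====
-- inner while loop: scan forward until the next backtick; returns (chars scanned = content[i+1:j], remainder after the closing backtick)
def pvInnerA : List Char → List Char × List Char
  | [] => ([], [])
  | c :: rest => if c = '`' then ([], rest)
                 else let p := pvInnerA rest; (c :: p.1, p.2)

theorem pvInnerA_len (cs : List Char) : (pvInnerA cs).2.length ≤ cs.length := by
  induction cs with
  | nil => simp [pvInnerA]
  | cons c rest ih =>
      simp only [pvInnerA]
      split
      · simp
      · simpa using Nat.le_succ_of_le ih

-- outer while loop of A over the remaining characters, carrying (result, codes)
def pvLoopA : List Char → List String → List String → List String × List String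
  | [], res, codes => (res, codes)
  | c :: rest, res, codes =>
      if c = '`' then
        let p := pvInnerA rest
        let codes' := codes ++ [String.ofList p.1]
        pvLoopA p.2 (res ++ ["[CODE" ++ PySem.Int.toStr ((codes'.length : Int) - 1) ++ "]"]) codes'
      else
        pvLoopA rest (res ++ [String.ofList [c]]) codes
  termination_by cs => cs.length
  decreasing_by
  · exact Nat.lt_succ_of_le (pvInnerA_len rest)
  · simp

def preprocess_backticks (content : String) : String × List String :=
  let r := pvLoopA content.toList [] []
  (PySem.Str.join "" r.1, r.2)

-- ===== PORT B =====
def preprocess_backticks_alt (content : String) : String × List String :=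
  -- content.split('`'), nonempty separator: PySem.Chars.splitOn on the code points
  let parts := (PySem.Chars.splitOn content.toList ['`']).map String.ofList
  let fin := (PySem.List.enumerate parts 0).foldl
    (fun (st : List String × List String) p =>
      if p.1 % 2 == 0 then (st.1 ++ [p.2], st.2)
      else
        let codes' := st.2 ++ [p.2]
        (st.1 ++ ["[CODE" ++ PySem.Int.toStr ((codes'.length : Int) - 1) ++ "]"], codes'))
    ([], [])
  (PySem.Str.join "" fin.1, fin.2)

-- ===== PRECONDITION & SPEC =====
def Spec_preprocess_backticks (content : String) (out : String × List String) : Prop := out = preprocess_backticks_alt content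
instance (content : String) (out : String × List String) : Decidable (Spec_preprocess_backticks content out) := by unfold Spec_preprocess_backticks; infer_instance

-- ===== CLAIM (what is proved, stated in full; the proofs are below) =====
def Claim_equal_preprocess_backticks : Prop := ∀ (content : String), Dom_preprocess_backticks content → Spec_preprocess_backticks content (preprocess_backticks content)

-- ===== LEMMAS AND PROOFS =====

-- single-char split of a char list at '`': (first part, remaining parts)
def pvStick : List Char → List Char × List (List Char)
  | [] => ([], [])
  | c :: rest =>
      if c = '`' then ([], (pvStick rest).1 :: (pvStick rest).2)
      else (c :: (pvStick rest).1, (pvStick rest).2)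

def pvStickL (cs : List Char) : List (List Char) := (pvStick cs).1 :: (pvStick cs).2

-- the common reference computation: process the parts pairwise, k = current number of codes
def pvRun : List (List Char) → Nat → List Char × List String
  | [], _ => ([], [])
  | [p], _ => (p, [])
  | p :: q :: rest, k =>
      let r := pvRun rest (k + 1)
      (p ++ "[CODE".toList ++ PySem.Int.toChars (k : Int) ++ "]".toList ++ r.1,
       String.ofList q :: r.2)

theorem pvRun_cons_char (c : Char) (p : List Char) (ps : List (List Char)) (k : Nat) :
    pvRun ((c :: p) :: ps) k = (c :: (pvRun (p :: ps) k).1, (pvRun (p :: ps) k).2) := by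
  cases ps <;> simp [pvRun]

theorem pvGo_eq (fuel : Nat) : ∀ (l cur : List Char) (acc : List (List Char)),
    l.length ≤ fuel →
    PySem.Chars.splitOn.go ['`'] fuel l cur acc
      = acc.reverse ++ (cur.reverse ++ (pvStick l).1) :: (pvStick l).2 := by
  induction fuel with
  | zero =>
      intro l cur acc h
      have hl : l = [] := List.eq_nil_of_length_eq_zero (Nat.le_zero.mp h)
      subst hl
      simp [PySem.Chars.splitOn.go, pvStick]
  | succ fuel ih =>
      intro l cur acc h
      cases l with
      | nil => simp [PySem.Chars.splitOn.go, pvStick]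
      | cons c rest =>
          by_cases hc : c = '`'
          · subst hc
            rw [show PySem.Chars.splitOn.go ['`'] (fuel+1) ('`' :: rest) cur acc
                  = PySem.Chars.splitOn.go ['`'] fuel rest [] (cur.reverse :: acc) by
                simp [PySem.Chars.splitOn.go, List.isPrefixOf]]
            rw [ih rest [] (cur.reverse :: acc) (by simpa using Nat.le_of_succ_le_succ h)]
            simp [pvStick]
          · rw [show PySem.Chars.splitOn.go ['`'] (fuel+1) (c :: rest) cur acc
                  = PySem.Chars.splitOn.go ['`'] fuel rest (c :: cur) acc by
                simp [PySem.Chars.splitOn.go, List.isPrefixOf, show ¬('`' = c) from fun h => hc h.symm]]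
            rw [ih rest (c :: cur) acc (by simpa using Nat.le_of_succ_le_succ h)]
            simp [pvStick, hc]

theorem pvSplitOn_eq_stickL (cs : List Char) :
    PySem.Chars.splitOn cs ['`'] = pvStickL cs := by
  unfold PySem.Chars.splitOn pvStickL
  rw [pvGo_eq (cs.length + 1) cs [] [] (Nat.le_succ _)]
  simp

theorem pvInnerA_no_tick (cs : List Char) (h : '`' ∉ cs) : pvInnerA cs = (cs, []) := by
  induction cs with
  | nil => simp [pvInnerA]
  | cons c rest ih =>
      simp only [List.mem_cons, not_or] at h
      simp [pvInnerA, Ne.symm h.1, ih h.2]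

theorem pvStick_innerA (cs : List Char) :
    pvStick cs = if '`' ∈ cs then
        ((pvInnerA cs).1, (pvStick (pvInnerA cs).2).1 :: (pvStick (pvInnerA cs).2).2)
      else ((pvInnerA cs).1, []) := by
  induction cs with
  | nil => simp [pvStick, pvInnerA]
  | cons c rest ih =>
      by_cases hc : c = '`'
      · subst hc; simp [pvStick, pvInnerA]
      · simp only [pvStick, pvInnerA, if_neg hc, ih]
        by_cases hm : '`' ∈ rest <;>
          simp [hm, List.mem_cons, show ¬('`' = c) from fun h => hc h.symm]

-- A's loop computes pvRun of the split parts
theorem pvLoopA_run (cs : List Char) (res codes : List String) :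
    (((pvLoopA cs res codes).1).map String.toList).flatten
        = (res.map String.toList).flatten ++ (pvRun (pvStickL cs) codes.length).1
      ∧ (pvLoopA cs res codes).2 = codes ++ (pvRun (pvStickL cs) codes.length).2 := by
  induction cs, res, codes using pvLoopA.induct with
  | case1 res codes =>
      simp [pvLoopA, pvStickL, pvStick, pvRun]
  | case2 rest res codes p codes' ih =>
      rw [show pvLoopA ('`' :: rest) res codes
            = pvLoopA (pvInnerA rest).2
                (res ++ ["[CODE" ++ PySem.Int.toStr (((codes ++ [String.ofList (pvInnerA rest).1]).length : Int) - 1) ++ "]"])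
                (codes ++ [String.ofList (pvInnerA rest).1]) from by
          rw [pvLoopA]; simp]
      have h1 := And.left ih
      have h2 := And.right ih
      have hst : pvStickL ('`' :: rest) = [] :: (pvStick rest).1 :: (pvStick rest).2 := by
        simp [pvStickL, pvStick]
      have hp : p = pvInnerA rest := rfl
      have hc' : codes' = codes ++ [String.ofList (pvInnerA rest).1] := rfl
      simp only [hp, hc'] at h1 h2 ⊢
      by_cases hm : '`' ∈ rest
      · have hsi := pvStick_innerA rest
        rw [if_pos hm] at hsi
        constructor
        · rw [h1, hst]
          simp [pvRun, hsi, pvStickL, PySem.Int.toList_toStr, Nat.cast_add, Nat.cast_one,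
            add_sub_cancel_right]
        · rw [h2, hst]
          simp [pvRun, hsi, pvStickL]
      · have hsi := pvStick_innerA rest
        rw [if_neg hm] at hsi
        have hni := pvInnerA_no_tick rest hm
        constructor
        · rw [h1, hst]
          simp [pvRun, hsi, hni, pvStickL, pvStick, PySem.Int.toList_toStr, Nat.cast_add,
            Nat.cast_one, add_sub_cancel_right]
        · rw [h2, hst]
          simp [pvRun, hsi, hni, pvStickL, pvStick]
  | case3 c rest res codes hc ih =>
      rw [show pvLoopA (c :: rest) res codes
            = pvLoopA rest (res ++ [String.ofList [c]]) codes from by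
          rw [pvLoopA]; simp [hc]]
      have h1 := And.left ih
      have h2 := And.right ih
      have hst : pvStickL (c :: rest) = (c :: (pvStick rest).1) :: (pvStick rest).2 := by
        simp [pvStickL, pvStick, hc]
      constructor
      · rw [h1, hst, show (c :: (pvStick rest).1) :: (pvStick rest).2 = (c :: (pvStick rest).1) :: (pvStick rest).2 from rfl,
            pvRun_cons_char]
        simp [pvStickL]
      · rw [h2, hst, pvRun_cons_char]
        simp [pvStickL]

theorem pvFold_run (ps : List (List Char)) (k : Nat) :
    ∀ (i : Int) (res codes : List String), i % 2 = 0 → codes.length = k →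
    (let st := (PySem.List.enumerate (ps.map String.ofList) i).foldl
        (fun (st : List String × List String) p =>
          if p.1 % 2 == 0 then (st.1 ++ [p.2], st.2)
          else
            let codes' := st.2 ++ [p.2]
            (st.1 ++ ["[CODE" ++ PySem.Int.toStr ((codes'.length : Int) - 1) ++ "]"], codes'))
        (res, codes)
     (st.1.map String.toList).flatten = (res.map String.toList).flatten ++ (pvRun ps k).1
       ∧ st.2 = codes ++ (pvRun ps k).2) := by
  induction ps, k using pvRun.induct with
  | case1 k =>
      intro i res codes hi hk
      simp [pvRun]
  | case2 p k =>
      intro i res codes hi hk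
      have hb0 : (i % 2 == 0) = true := by simp [hi]
      simp only [List.map_cons, List.map_nil, PySem.List.enumerate_cons,
        PySem.List.enumerate_nil, List.foldl_cons, List.foldl_nil, hb0, if_true]
      simp [pvRun]
  | case3 p q rest k ih =>
      intro i res codes hi hk
      have hi1 : ((i + 1) % 2 == 0) = false := by
        simp only [beq_eq_false_iff_ne, ne_eq]
        omega
      have hi2 : (i + 2) % 2 = 0 := by omega
      have hk' : (codes ++ [String.ofList q]).length = k + 1 := by simp [hk]
      have step := ih (i + 2) (res ++ [String.ofList p] ++
          ["[CODE" ++ PySem.Int.toStr (((codes ++ [String.ofList q]).length : Int) - 1) ++ "]"])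
        (codes ++ [String.ofList q]) hi2 hk'
      have hb0 : (i % 2 == 0) = true := by simp [hi]
      have hadd : i + 1 + 1 = i + 2 := by ring
      simp only [List.map_cons, PySem.List.enumerate_cons, List.foldl_cons, hb0, hi1,
        if_true, Bool.false_eq_true, if_false, hadd] at step ⊢
      refine ⟨?_, ?_⟩
      · rw [And.left step]
        simp [pvRun, PySem.Int.toList_toStr, hk, Nat.cast_add, Nat.cast_one, add_sub_cancel_right]
      · rw [And.right step]
        simp [pvRun]

theorem pvJoin_eq_of_flatten_eq (xs ys : List String)
    (h : (xs.map String.toList).flatten = (ys.map String.toList).flatten) :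
    PySem.Str.join "" xs = PySem.Str.join "" ys := by
  have hj : ∀ (l : List (List Char)), PySem.Chars.join [] l = l.flatten := by
    intro l
    simp only [PySem.Chars.join, List.intercalate]
    induction l with
    | nil => simp
    | cons p ps ih => cases ps <;> simp_all [List.intersperse]
  unfold PySem.Str.join
  rw [show ("" : String).toList = ([] : List Char) from rfl]
  rw [hj, hj, h]

-- ===== VERDICT (by name: the statement is the Claim_ definition above) =====
theorem preprocess_backticks_spec : Claim_equal_preprocess_backticks := by
  unfold Claim_equal_preprocess_backticks Spec_preprocess_backticks
  intro content _
  unfold preprocess_backticks preprocess_backticks_alt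
  rw [pvSplitOn_eq_stickL]
  have hA := pvLoopA_run content.toList [] []
  have hB := pvFold_run (pvStickL content.toList) 0 0 [] [] (by decide) rfl
  simp only [] at hA hB ⊢
  have h1 : PySem.Str.join "" (pvLoopA content.toList [] []).1
      = PySem.Str.join "" ((PySem.List.enumerate ((pvStickL content.toList).map String.ofList) 0).foldl
          (fun (st : List String × List String) p =>
            if p.1 % 2 == 0 then (st.1 ++ [p.2], st.2)
            else
              let codes' := st.2 ++ [p.2]
              (st.1 ++ ["[CODE" ++ PySem.Int.toStr ((codes'.length : Int) - 1) ++ "]"], codes'))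
          ([], [])).1 := by
    apply pvJoin_eq_of_flatten_eq
    rw [And.left hA, And.left hB]
    simp
  have h2 := (And.right hA).trans (And.right hB).symm
  exact Prod.ext h1 h2
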